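-- pv_equiv track=rewrite | github.com/microsoft/azure-genai-design-patterns | 4_accelerators/01-rag-agent/rag-agent-promptflow/ragcore/utils.py | make_valid_json
-- ===== SOURCE A (Python) =====
-- def make_valid_json(text: str) -> str:
--     # Verify matching terminators.
--     stack = []
--     pos = 0
--     while pos < len(text):
--         char = text[pos]
--         if char == '{':
--             stack.append('}')
--         elif char == '[':
--             stack.append(']')
--         elif char == '"':
--             stack.append('"')
--             pos = pos + 1
--             while pos < len(text):
--                 if text[pos] == '"' and text[pos - 1] != '\\':
--                     stack.pop()
--                     break
--                 pos = pos + 1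
--         elif stack and char == stack[-1]:
--             stack.pop()
--         pos = pos + 1
--
--     # Verify doesn't end with a backslash.
--     if text and text[-1] == '\\':
--         text = text[:-1]
--
--     # Add missing terminators.
--     for char in reversed(stack):
--         text = text + char
--     return text
-- ===== SOURCE B (Python) =====
-- def make_valid_json(text: str) -> str:
--     # Staged passes: split the text on the quote character and walk the segments to drop
--     # string literals, then fold the remaining text's brackets through a stack.
--     segs = text.split('"')
--     outside = [segs[0]]
--     inside = False
--     for k in range(1, len(segs)):
--         if inside and segs[k - 1].endswith('\\'):
--             pass  # escaped quote: still inside the string literal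
--         else:
--             inside = not inside
--         if not inside:
--             outside.append(segs[k])
--     stack = []
--     for c in ''.join(outside):
--         if c == '{':
--             stack.append('}')
--         elif c == '[':
--             stack.append(']')
--         elif stack and c == stack[-1]:
--             stack.pop()
--     body = text[:-1] if text.endswith('\\') else text
--     return body + ('"' if inside else '') + ''.join(reversed(stack))
-- ===== Notes on version B (the rewrite author's own statement) =====
-- stated objective: faster
-- what changed: Replaced A's single character-by-character scanner (with a nested inner while-loop for strings) by two staged passes: split the text on the double-quote character, walk the segment list to drop string-literal segments (an escaped quote is a segment ending in a backslash), then fold only the remaining outside text's brackets through a stack.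
import Mathlib
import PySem

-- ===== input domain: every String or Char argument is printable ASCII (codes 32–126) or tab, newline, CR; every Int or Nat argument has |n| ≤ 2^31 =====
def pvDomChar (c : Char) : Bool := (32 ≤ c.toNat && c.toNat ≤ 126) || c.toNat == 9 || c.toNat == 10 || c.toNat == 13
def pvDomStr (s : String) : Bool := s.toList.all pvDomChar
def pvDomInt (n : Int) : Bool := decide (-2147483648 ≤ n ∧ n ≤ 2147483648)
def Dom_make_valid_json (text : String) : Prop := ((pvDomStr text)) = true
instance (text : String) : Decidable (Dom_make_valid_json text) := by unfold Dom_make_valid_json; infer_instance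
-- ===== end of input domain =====

-- B replaces A's character-by-character scanner (with a nested inner while-loop for
-- strings) by two staged passes: split on the double-quote character, walk the segments
-- to drop string literals, then fold the remaining brackets through a stack (faster).

-- ===== PORT A =====
-- A's outer while-loop; the stack is kept top-first (Python's stack[-1] = head).
mutual
def pvALoop : List Char → List Char → List Char
  | [], stack => stack
  | c :: rest, stack =>
    if c = '{' then pvALoop rest ('}' :: stack)
    else if c = '[' then pvALoop rest (']' :: stack)
    else if c = '"' then pvAInner c rest ('"' :: stack)
    else match stack with
      | t :: s => if c = t then pvALoop rest s else pvALoop rest (t :: s)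
      | [] => pvALoop rest []
-- A's inner while-loop scanning for the closing quote (prev = text[pos-1]).
def pvAInner : Char → List Char → List Char → List Char
  | _, [], stack => stack
  | prev, c :: rest, stack =>
    if c = '"' ∧ prev ≠ '\\' then pvALoop rest stack.tail
    else pvAInner c rest stack
end

def make_valid_json (text : String) : String :=
  let stack := pvALoop text.toList []
  -- if text and text[-1] == '\\': text = text[:-1]
  let t := if text.toList.getLast? = some '\\' then text.toList.dropLast else text.toList
  -- for char in reversed(stack): text += char   (top-first list = reversed Python stack)
  String.mk (t ++ stack)

-- ===== PORT B =====
-- Source B's segment walk: k runs over 1..len(segs), prev = segs[k-1], cur = segs[k];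
-- returns (the segments appended to `outside` after segs[0], the final `inside` flag).
def pvBWalk : Bool → List Char → List (List Char) → List (List Char) × Bool
  | inside, _, [] => ([], inside)
  | inside, prev, cur :: rest =>
    let inside' := if inside && PySem.Chars.endswith prev ['\\'] then inside else !inside
    let r := pvBWalk inside' cur rest
    (if inside' then r.1 else cur :: r.1, r.2)

-- Source B's stage-2 loop body (stack kept top-first).
def pvBStep (stack : List Char) (c : Char) : List Char :=
  if c = '{' then '}' :: stack
  else if c = '[' then ']' :: stack
  else match stack with
    | t :: s => if c = t then s else t :: s
    | [] => []

def make_valid_json_alt (text : String) : String :=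
  let segs := PySem.Chars.splitOn text.toList ['"']
  let seg0 := segs.headD []          -- segs[0]; split of any string is nonempty
  let r := pvBWalk false seg0 segs.tail
  let stack := List.foldl pvBStep [] (seg0 :: r.1).flatten    -- ''.join(outside)
  let body := if PySem.Chars.endswith text.toList ['\\'] then text.toList.dropLast else text.toList
  String.mk (body ++ (if r.2 then ['"'] else []) ++ stack)

-- ===== PRECONDITION & SPEC =====
def Spec_make_valid_json (text : String) (out : String) : Prop := out = make_valid_json_alt text
instance (text : String) (out : String) : Decidable (Spec_make_valid_json text out) := by unfold Spec_make_valid_json; infer_instance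

-- ===== CLAIM (what is proved, stated in full; the proofs are below) =====
def Claim_equal_make_valid_json : Prop := ∀ (text : String), Dom_make_valid_json text → Spec_make_valid_json text (make_valid_json text)

-- ===== LEMMAS AND PROOFS =====

-- Reference splitter: Python text.split('"') as a structural recursion.
def pvConsHead : List Char → List (List Char) → List (List Char)
  | pre, [] => [pre]
  | pre, p :: ps => (pre ++ p) :: ps

def pvSplit : List Char → List (List Char)
  | [] => [[]]
  | c :: rest => if c = '"' then [] :: pvSplit rest else pvConsHead [c] (pvSplit rest)

-- Rejoin all but the first segment, with the '"' boundaries put back.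
def pvJ : List (List Char) → List Char
  | [] => []
  | s :: ss => '"' :: (s ++ pvJ ss)

theorem pvSplit_ne_nil (s : List Char) : pvSplit s ≠ [] := by
  cases s with
  | nil => simp [pvSplit]
  | cons c rest =>
    simp only [pvSplit]
    split
    · simp
    · cases h : pvSplit rest <;> simp [pvConsHead]

theorem pvSplit_quote_free (s : List Char) : ∀ p ∈ pvSplit s, '"' ∉ p := by
  induction s with
  | nil => simp [pvSplit]
  | cons c rest ih =>
    simp only [pvSplit]
    split
    · intro p hp
      rcases List.mem_cons.mp hp with h | h
      · subst h; simp
      · exact ih p h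
    · rename_i hc
      cases h : pvSplit rest with
      | nil => exact absurd h (pvSplit_ne_nil rest)
      | cons p ps =>
        simp only [pvConsHead, List.singleton_append]
        intro q hq
        rcases List.mem_cons.mp hq with h' | h'
        · subst h'
          intro hmem
          rcases List.mem_cons.mp hmem with h'' | h''
          · exact hc h''.symm
          · exact (ih p (by simp [h])) h''
        · exact ih q (by simp [h, h'])

theorem pvSplit_join (s : List Char) : s = (pvSplit s).headD [] ++ pvJ (pvSplit s).tail := by
  induction s with
  | nil => simp [pvSplit, pvJ]
  | cons c rest ih =>
    simp only [pvSplit]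
    split
    · rename_i hc
      subst hc
      cases h : pvSplit rest with
      | nil => exact absurd h (pvSplit_ne_nil rest)
      | cons p ps =>
        rw [h] at ih
        simp only [List.headD, List.tail_cons] at ih
        simp only [List.headD, List.tail_cons, pvJ, List.nil_append]
        rw [← ih]
    · rename_i hc
      cases h : pvSplit rest with
      | nil => exact absurd h (pvSplit_ne_nil rest)
      | cons p ps =>
        rw [h] at ih
        simp only [List.headD, List.tail_cons] at ih
        simp [pvConsHead, ih]

-- PySem's splitOn on separator '"' computes pvSplit.
theorem pvGo_eq (fuel : Nat) : ∀ (l cur : List Char) (acc : List (List Char)),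
    l.length < fuel →
    PySem.Chars.splitOn.go ['"'] fuel l cur acc = acc.reverse ++ pvConsHead cur.reverse (pvSplit l) := by
  induction fuel with
  | zero => intro l _ _ h; exact absurd h (Nat.not_lt_zero _)
  | succ fuel ih =>
    intro l cur acc h
    cases l with
    | nil => simp [PySem.Chars.splitOn.go, pvSplit, pvConsHead]
    | cons c rest =>
      by_cases hc : c = '"'
      · subst hc
        rw [PySem.Chars.splitOn.go]
        simp only [List.isPrefixOf, BEq.rfl, Bool.true_and, if_true, List.length_cons,
          List.length_nil, List.drop_succ_cons, List.drop_zero]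
        rw [ih rest [] (cur.reverse :: acc) (by simp only [List.length_cons] at h; omega)]
        cases hr : pvSplit rest with
        | nil => exact absurd hr (pvSplit_ne_nil rest)
        | cons p ps => simp [pvSplit, pvConsHead, hr]
      · rw [PySem.Chars.splitOn.go]
        have hp : (['"'].isPrefixOf (c :: rest)) = false := by
          simp [List.isPrefixOf]
          exact fun h' => hc h'.symm
        rw [hp]
        simp only [Bool.false_eq_true, if_false]
        rw [ih rest (c :: cur) acc (by simp only [List.length_cons] at h; omega)]
        have hs : pvSplit (c :: rest) = pvConsHead [c] (pvSplit rest) := by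
          simp [pvSplit, hc]
        rw [hs]
        cases hr : pvSplit rest with
        | nil => exact absurd hr (pvSplit_ne_nil rest)
        | cons p ps => simp [pvConsHead, List.append_assoc]

theorem pvSplitOn_eq (s : List Char) : PySem.Chars.splitOn s ['"'] = pvSplit s := by
  rw [PySem.Chars.splitOn, pvGo_eq (s.length + 1) s [] [] (by omega)]
  cases h : pvSplit s with
  | nil => exact absurd h (pvSplit_ne_nil s)
  | cons p ps => simp [pvConsHead]

-- endswith '\' answered by the last character.
theorem pvEnds (l : List Char) : (PySem.Chars.endswith l ['\\'] = true) ↔ l.getLast? = some '\\' := by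
  rw [PySem.Chars.endswith_iff]
  constructor
  · rintro ⟨t, rfl⟩
    simp
  · intro h
    obtain ⟨t, ht⟩ := (List.getLast?_eq_some_iff).mp h
    exact ⟨t, ht.symm⟩

theorem pvEndsD (l : List Char) : (PySem.Chars.endswith l ['\\'] = true) ↔ l.getLastD '"' = '\\' := by
  rw [pvEnds, List.getLastD_eq_getLast?]
  cases h : l.getLast? with
  | none => simp
  | some c => simp

-- A over a quote-free chunk outside a string = Source B's stage-2 fold.
theorem pvALoop_chunk (seg : List Char) (hq : '"' ∉ seg) :
    ∀ (rest : List Char) (S : List Char),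
      pvALoop (seg ++ rest) S = pvALoop rest (List.foldl pvBStep S seg) := by
  induction seg with
  | nil => intro rest S; simp
  | cons c seg' ih =>
    intro rest S
    have hc : c ≠ '"' := fun h => hq (by simp [h])
    have hq' : '"' ∉ seg' := fun h => hq (List.mem_cons_of_mem _ h)
    rw [List.cons_append, List.foldl_cons, pvALoop.eq_def]
    dsimp only
    by_cases h1 : c = '{'
    · rw [if_pos h1, show pvBStep S c = '}' :: S from by simp [pvBStep, h1]]
      exact ih hq' rest _
    · by_cases h2 : c = '['
      · rw [if_neg h1, if_pos h2, show pvBStep S c = ']' :: S from by simp [pvBStep, h1, h2]]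
        exact ih hq' rest _
      · rw [if_neg h1, if_neg h2, if_neg hc]
        cases S with
        | nil =>
          rw [show pvBStep [] c = [] from by simp [pvBStep, h1, h2]]
          exact ih hq' rest _
        | cons t s =>
          by_cases h4 : c = t
          · rw [show pvBStep (t :: s) c = s from by subst h4; simp [pvBStep, h1, h2]]
            dsimp only
            rw [if_pos h4]
            exact ih hq' rest _
          · rw [show pvBStep (t :: s) c = t :: s from by simp [pvBStep, h1, h2, h4]]
            dsimp only
            rw [if_neg h4]
            exact ih hq' rest _

-- A's inner scan over a quote-free chunk only updates prev to the chunk's last char.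
theorem pvAInner_chunk (seg : List Char) (hq : '"' ∉ seg) :
    ∀ (prev : Char) (rest : List Char) (st : List Char),
      pvAInner prev (seg ++ rest) st = pvAInner (seg.getLastD prev) rest st := by
  induction seg with
  | nil => intro prev rest st; simp
  | cons c seg' ih =>
    intro prev rest st
    have hc : c ≠ '"' := fun h => hq (by simp [h])
    have hq' : '"' ∉ seg' := fun h => hq (List.mem_cons_of_mem _ h)
    rw [List.cons_append, pvAInner.eq_def]
    dsimp only
    rw [if_neg (fun hx => hc hx.1), List.getLastD_cons]
    exact ih hq' c rest st

-- Joint invariant: A's scanner over the re-joined tail segments equals B's walk.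
theorem pvWalk_eq : ∀ (rest : List (List Char)), (∀ p ∈ rest, '"' ∉ p) →
    ((∀ (S : List Char) (prev : List Char),
       pvALoop (pvJ rest) S =
         (if (pvBWalk false prev rest).2 then ['"'] else []) ++
           List.foldl pvBStep S (pvBWalk false prev rest).1.flatten)
    ∧ (∀ (S : List Char) (cur : List Char), '"' ∉ cur →
       pvAInner '"' (cur ++ pvJ rest) ('"' :: S) =
         (if (pvBWalk true cur rest).2 then ['"'] else []) ++
           List.foldl pvBStep S (pvBWalk true cur rest).1.flatten)) := by
  intro rest
  induction rest with
  | nil =>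
    intro _
    constructor
    · intro S prev
      simp [pvJ, pvALoop, pvBWalk]
    · intro S cur hcur
      simp only [pvJ]
      rw [pvAInner_chunk cur hcur]
      simp [pvAInner, pvBWalk]
  | cons cur0 rest' ih =>
    intro hqf
    have hcur0 : '"' ∉ cur0 := hqf cur0 (by simp)
    have hrest' : ∀ p ∈ rest', '"' ∉ p := fun p hp => hqf p (by simp [hp])
    have IH := ih hrest'
    constructor
    · intro S prev
      simp only [pvJ]
      rw [pvALoop.eq_def]
      dsimp only
      rw [if_neg (by decide : ¬('"' = '{')), if_neg (by decide : ¬('"' = '[')), if_pos rfl]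
      rw [IH.2 S cur0 hcur0]
      have hw : pvBWalk false prev (cur0 :: rest') = pvBWalk true cur0 rest' := by
        simp [pvBWalk]
      rw [hw]
    · intro S cur hcur
      simp only [pvJ]
      rw [pvAInner_chunk cur hcur, pvAInner.eq_def]
      dsimp only
      by_cases hbs : cur.getLastD '"' = '\\'
      · -- escaped quote: the string literal continues into the next segment
        rw [if_neg (fun hx => hx.2 hbs)]
        rw [IH.2 S cur0 hcur0]
        have hw : pvBWalk true cur (cur0 :: rest') = pvBWalk true cur0 rest' := by
          simp [pvBWalk, (pvEndsD cur).mpr hbs]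
        rw [hw]
      · -- closing quote: back outside
        rw [if_pos ⟨rfl, hbs⟩]
        dsimp only [List.tail_cons]
        rw [pvALoop_chunk cur0 hcur0, IH.1 (List.foldl pvBStep S cur0) cur0]
        have hE : PySem.Chars.endswith cur ['\\'] = false := by
          rw [Bool.eq_false_iff]
          exact fun hx => hbs ((pvEndsD cur).mp hx)
        have hw : pvBWalk true cur (cur0 :: rest')
            = (cur0 :: (pvBWalk false cur0 rest').1, (pvBWalk false cur0 rest').2) := by
          simp [pvBWalk, hE]
        rw [hw]
        simp [List.flatten_cons, List.foldl_append]

-- ===== VERDICT (by name: the statement is the Claim_ definition above) =====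
theorem make_valid_json_spec : Claim_equal_make_valid_json := by
  intro text _
  unfold Spec_make_valid_json make_valid_json make_valid_json_alt
  rw [pvSplitOn_eq]
  cases h : pvSplit text.toList with
  | nil => exact absurd h (pvSplit_ne_nil text.toList)
  | cons seg0 segs' =>
    have hqf := pvSplit_quote_free text.toList
    rw [h] at hqf
    have hseg0 : '"' ∉ seg0 := hqf seg0 (by simp)
    have hsegs' : ∀ p ∈ segs', '"' ∉ p := fun p hp => hqf p (by simp [hp])
    have hjoin := pvSplit_join text.toList
    rw [h] at hjoin
    simp only [List.headD, List.tail_cons] at hjoin ⊢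
    have hA : pvALoop text.toList [] =
        (if (pvBWalk false seg0 segs').2 then ['"'] else []) ++
          List.foldl pvBStep [] (seg0 :: (pvBWalk false seg0 segs').1).flatten := by
      conv_lhs => rw [hjoin]
      rw [pvALoop_chunk seg0 hseg0, (pvWalk_eq segs' hsegs').1 (List.foldl pvBStep [] seg0) seg0]
      simp [List.flatten_cons, List.foldl_append]
    rw [hA]
    have hbody : (if text.toList.getLast? = some '\\' then text.toList.dropLast else text.toList)
        = (if PySem.Chars.endswith text.toList ['\\'] then text.toList.dropLast else text.toList) := by
      by_cases hl : text.toList.getLast? = some '\\'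
      · rw [if_pos hl, if_pos ((pvEnds _).mpr hl)]
      · rw [if_neg hl, if_neg (fun hE => hl ((pvEnds _).mp hE))]
    rw [hbody]
    simp only [List.append_assoc]
    rfl
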